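-- pv_equiv track=rewrite | github.com/MentatInnovations/datastream.io | arxiv/utils_dashboard.py | sizes_to_rowcols
-- ===== SOURCE A (Python) =====
-- def sizes_to_rowcols(l):
-- 	row_col = []
-- 	for i in range(len(l)):
-- 		if i == 0:
-- 			row_col.append([1,1])
-- 		elif i % 2 == 1:
-- 			row_col.append([None,row_col[i-1][1]+l[i-1][0]])
-- 		else:
-- 			row_col.append([None,1])
--
-- 	for i in range(len(l)):
-- 		if i == 0:
-- 			continue
-- 		elif i % 2 == 1:
-- 			row_col[i][0] = row_col[i-1][0]
-- 		else:
-- 			row_col[i][0] = row_col[i-1][0] + l[i-1][1]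
-- 	return row_col
-- ===== SOURCE B (Python) =====
-- def sizes_to_rowcols(l):
--     n = len(l)
--     out = []
--     row = 1
--     for i in range(0, n, 2):
--         if i > 0:
--             row += l[i - 1][1]
--         out.append([row, 1])
--         if i + 1 < n:
--             out.append([row, 1 + l[i][0]])
--     return out
-- ===== Notes on version B (the rewrite author's own statement) =====
-- stated objective: simpler
-- what changed: Replaced A's two sequential passes (append [None,col] placeholders, then a second loop filling row[0] by indexing back into the output) with one stride-2 loop over column pairs that keeps a single running row accumulator and emits both finished entries of each row at once.
import Mathlib
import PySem

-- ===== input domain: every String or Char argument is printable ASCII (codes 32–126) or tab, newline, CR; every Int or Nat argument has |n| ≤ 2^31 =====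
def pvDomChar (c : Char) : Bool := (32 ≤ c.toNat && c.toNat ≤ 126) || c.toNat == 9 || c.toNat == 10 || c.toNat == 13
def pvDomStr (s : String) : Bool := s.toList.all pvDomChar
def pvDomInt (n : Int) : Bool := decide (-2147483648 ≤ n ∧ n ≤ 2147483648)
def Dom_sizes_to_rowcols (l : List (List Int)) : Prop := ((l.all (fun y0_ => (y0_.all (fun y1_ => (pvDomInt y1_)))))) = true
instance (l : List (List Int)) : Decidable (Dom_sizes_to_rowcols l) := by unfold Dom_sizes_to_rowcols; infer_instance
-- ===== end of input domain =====

-- B replaces A's two sequential passes (append [None, col] entries, then a second loop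
-- filling row[0] by reading back into the output) by one stride-2 loop over row pairs
-- keeping a single running row accumulator (objective: simpler).

-- ===== PORT A =====
-- first loop: row_col holds (Option row, col); None is the unfilled row slot
def pass1Step (l : List (List Int)) (acc : List (Option Int × Int)) (i : Nat) : List (Option Int × Int) :=
  if i = 0 then acc ++ [(some 1, 1)]
  else if i % 2 = 1 then
    acc ++ [(none, (acc.getD (i - 1) (none, 0)).2 + ((l.getD (i - 1) []).getD 0 0))]
  else acc ++ [(none, 1)]

-- second loop: row_col[i][0] := …  (acc holds the already-filled prefix)
def pass2Step (l : List (List Int)) (rc : List (Option Int × Int)) (acc : List (List Int)) (i : Nat) : List (List Int) :=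
  if i = 0 then acc ++ [[((rc.getD 0 (none, 0)).1.getD 0), (rc.getD 0 (none, 0)).2]]
  else
    let prevRow := (acc.getD (i - 1) []).getD 0 0
    if i % 2 = 1 then acc ++ [[prevRow, (rc.getD i (none, 0)).2]]
    else acc ++ [[prevRow + ((l.getD (i - 1) []).getD 1 0), (rc.getD i (none, 0)).2]]

def sizes_to_rowcols (l : List (List Int)) : List (List Int) :=
  let rc := (List.range l.length).foldl (pass1Step l) []
  (List.range l.length).foldl (pass2Step l rc) []

-- ===== PORT B =====
-- one stride-2 loop over pairs with a running row accumulator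
def altGo (l : List (List Int)) (i : Nat) (row : Int) : List (List Int) :=
  if i < l.length then
    let row' := if i > 0 then row + ((l.getD (i - 1) []).getD 1 0) else row
    if i + 1 < l.length then
      [row', 1] :: [row', 1 + ((l.getD i []).getD 0 0)] :: altGo l (i + 2) row'
    else [[row', 1]]
  else []
termination_by l.length - i

def sizes_to_rowcols_alt (l : List (List Int)) : List (List Int) := altGo l 0 1

-- ===== PRECONDITION & SPEC =====
-- Pre_ excludes exactly the inputs on which the Python A raises IndexError:
-- every inner list except the last must have length ≥ 1 (even index) / ≥ 2 (odd index).
def Pre_sizes_to_rowcols (l : List (List Int)) : Prop :=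
  ∀ j < l.length, j + 1 < l.length →
    (if j % 2 = 0 then 1 else 2) ≤ (l.getD j []).length
instance (l : List (List Int)) : Decidable (Pre_sizes_to_rowcols l) := by
  unfold Pre_sizes_to_rowcols; infer_instance

def pvWitness_sizes_to_rowcols : List (List Int) := [[1, 2], [3, 4], [5]]

def Spec_sizes_to_rowcols (l : List (List Int)) (out : List (List Int)) : Prop := out = sizes_to_rowcols_alt l
instance (l : List (List Int)) (out : List (List Int)) : Decidable (Spec_sizes_to_rowcols l out) := by unfold Spec_sizes_to_rowcols; infer_instance

-- ===== CLAIM (what is proved, stated in full; the proofs are below) =====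
def Claim_equal_sizes_to_rowcols : Prop := ∀ (l : List (List Int)), Dom_sizes_to_rowcols l → Pre_sizes_to_rowcols l → Spec_sizes_to_rowcols l (sizes_to_rowcols l)

-- ===== LEMMAS AND PROOFS =====

-- closed forms for the row / col value at index i
def rowOf (l : List (List Int)) : Nat → Int
  | 0 => 1
  | (i + 1) => if (i + 1) % 2 = 1 then rowOf l i else rowOf l i + ((l.getD i []).getD 1 0)

def colOf (l : List (List Int)) : Nat → Int
  | 0 => 1
  | (i + 1) => if (i + 1) % 2 = 1 then colOf l i + ((l.getD i []).getD 0 0) else 1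

theorem map_range_getD {α : Type} (g : Nat → α) (n k : Nat) (d : α) (h : k < n) :
    (((List.range n).map g).getD k d) = g k := by
  simp [List.getD, h]

theorem pass1_eq (l : List (List Int)) (n : Nat) :
    (List.range n).foldl (pass1Step l) [] =
      (List.range n).map (fun i => ((if i = 0 then some 1 else none), colOf l i)) := by
  induction n with
  | zero => simp
  | succ n ih =>
    rw [List.range_succ, List.foldl_append, List.map_append, ih]
    simp only [List.foldl_cons, List.foldl_nil, List.map_cons, List.map_nil]
    rcases Nat.eq_zero_or_pos n with h0 | hpos
    · subst h0; simp [pass1Step, colOf]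
    · have hne : n ≠ 0 := by omega
      by_cases h2 : n % 2 = 1
      · simp only [pass1Step, hne, if_false, h2, if_true]
        rw [map_range_getD _ n (n - 1) (none, (0 : Int)) (by omega)]
        obtain ⟨k, rfl⟩ : ∃ k, n = k + 1 := ⟨n - 1, by omega⟩
        simp [colOf, h2]
      · simp only [pass1Step, hne, if_false, h2]
        obtain ⟨k, rfl⟩ : ∃ k, n = k + 1 := ⟨n - 1, by omega⟩
        simp [colOf, h2]

theorem pass2_eq (l : List (List Int)) (n : Nat) (hn : n ≤ l.length) :
    (List.range n).foldl
        (pass2Step l ((List.range l.length).map (fun i => ((if i = 0 then some 1 else none), colOf l i)))) [] =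
      (List.range n).map (fun i => [rowOf l i, colOf l i]) := by
  induction n with
  | zero => simp
  | succ n ih =>
    have hn' : n ≤ l.length := Nat.le_of_succ_le hn
    rw [List.range_succ, List.foldl_append, List.map_append, ih hn']
    simp only [List.foldl_cons, List.foldl_nil, List.map_cons, List.map_nil]
    rcases Nat.eq_zero_or_pos n with h0 | hpos
    · subst h0
      simp only [pass2Step, if_true]
      rw [map_range_getD _ l.length 0 (none, (0 : Int)) (by omega)]
      simp [rowOf, colOf]
    · have hne : n ≠ 0 := by omega
      have hacc := map_range_getD (fun i => [rowOf l i, colOf l i]) n (n - 1) ([] : List Int) (by omega)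
      simp only [pass2Step, hne, if_false, hacc]
      obtain ⟨k, rfl⟩ : ∃ k, n = k + 1 := ⟨n - 1, by omega⟩
      have hklt : k + 1 < l.length := by omega
      by_cases h2 : (k + 1) % 2 = 1
      · simp [rowOf, h2, hklt]
      · simp [rowOf, h2, hklt]

-- rowOf is constant across an odd step
theorem rowOf_odd (l : List (List Int)) (k : Nat) (h : (k + 1) % 2 = 1) :
    rowOf l (k + 1) = rowOf l k := by simp [rowOf, h]

theorem altGo_eq (l : List (List Int)) :
    ∀ (fuel i : Nat) (row : Int), l.length - i ≤ fuel → i % 2 = 0 → row = rowOf l (i - 2) →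
      altGo l i row = (List.range' i (l.length - i)).map (fun j => [rowOf l j, colOf l j]) := by
  intro fuel
  induction fuel with
  | zero =>
    intro i row hf _ _
    have hi : ¬ i < l.length := by omega
    have h0 : l.length - i = 0 := by omega
    rw [altGo, h0]
    simp [hi]
  | succ fuel ih =>
    intro i row hf h2 hrow
    rw [altGo]
    by_cases hi : i < l.length
    · simp only [hi, if_true]
      have hrow' : (if i > 0 then row + ((l.getD (i - 1) []).getD 1 0) else row) = rowOf l i := by
        rcases Nat.eq_zero_or_pos i with h0 | hpos
        · subst h0; simpa [rowOf] using hrow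
        · obtain ⟨k, rfl⟩ : ∃ k, i = k + 2 := ⟨i - 2, by omega⟩
          have hodd : (k + 1) % 2 = 1 := by omega
          have hr2 : rowOf l (k + 2) = rowOf l (k + 1) + ((l.getD (k + 1) []).getD 1 0) := by
            rw [show k + 2 = (k + 1) + 1 from rfl, rowOf]
            simp [show ¬ ((k + 1 + 1) % 2 = 1) by omega]
          have hi1 : k + 2 - 1 = k + 1 := by omega
          have hi2 : k + 2 - 2 = k := by omega
          rw [hr2, rowOf_odd l k hodd]
          simp only [show k + 2 > 0 by omega, if_true, hi1, hi2] at *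
          rw [hrow]
      rw [hrow']
      have hcol_i : colOf l i = 1 := by
        rcases Nat.eq_zero_or_pos i with h0 | hpos
        · subst h0; rfl
        · obtain ⟨k, rfl⟩ : ∃ k, i = k + 1 := ⟨i - 1, by omega⟩
          simp [colOf, show ¬ ((k + 1) % 2 = 1) by omega]
      by_cases hi1 : i + 1 < l.length
      · simp only [hi1, if_true]
        have hrec := ih (i + 2) (rowOf l i) (by omega) (by omega) (by rw [show i + 2 - 2 = i from by omega])
        rw [hrec]
        have hlen : l.length - i = (l.length - (i + 2)) + 1 + 1 := by omega
        rw [hlen, List.range'_succ, List.range'_succ]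
        have hodd1 : (i + 1) % 2 = 1 := by omega
        simp only [List.map_cons, rowOf_odd l i hodd1, hcol_i]
        simp [colOf, hodd1, hcol_i, show i + 1 + 1 = i + 2 from rfl]
      · simp only [hi1, if_false]
        have hlen : l.length - i = 1 := by omega
        rw [hlen, List.range'_succ]
        have h0 : l.length - (i + 1) = 0 := by omega
        simp [hcol_i]
    · have h0 : l.length - i = 0 := by omega
      rw [h0]
      simp [hi]

-- ===== VERDICT (by name: the statement is the Claim_ definition above) =====
theorem sizes_to_rowcols_spec : Claim_equal_sizes_to_rowcols := by
  intro l _ _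
  unfold Spec_sizes_to_rowcols sizes_to_rowcols sizes_to_rowcols_alt
  rw [pass1_eq, pass2_eq l l.length le_rfl,
      altGo_eq l (l.length + 1) 0 1 (by omega) (by omega) (by simp [rowOf]),
      Nat.sub_zero, ← List.range_eq_range']
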